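-- pv_equiv track=rewrite | github.com/thebertster/aoc_2015 | aoc_2015/day_15.py | StarsAndBars
-- ===== SOURCE A (Python) =====
-- def StarsAndBars(bins, stars):
--     bars = [ ([0] * bins + [ stars ], 1) ]
--     while len(bars)>0:
--         b = bars.pop()
--         if b[1] == bins:
--             yield tuple(b[0][x] - b[0][x-1] for x in range(1, bins+1))
--         else:
--             bar = b[0][:b[1]]
--             for x in range(b[0][b[1]], stars+1):
--                 newBar = bar + [ x ] * (bins - b[1]) + [ stars ]
--                 bars.append( (newBar, b[1]+1) )
-- ===== SOURCE B (Python) =====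
-- def StarsAndBars(bins, stars):
--     def helper(b, s):
--         if b == 1:
--             yield (s,)
--         else:
--             for first in range(s, -1, -1):
--                 for rest in helper(b - 1, s - first):
--                     yield (first,) + rest
--     yield from helper(bins, stars)
-- ===== Notes on version B (the rewrite author's own statement) =====
-- stated objective: simpler
-- what changed: Replaces A's explicit worklist of (cumulative-positions list, level) pairs with a short recursive generator over the number of bins that yields the first part counting down and recurses on the remainder.
import Mathlib
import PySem

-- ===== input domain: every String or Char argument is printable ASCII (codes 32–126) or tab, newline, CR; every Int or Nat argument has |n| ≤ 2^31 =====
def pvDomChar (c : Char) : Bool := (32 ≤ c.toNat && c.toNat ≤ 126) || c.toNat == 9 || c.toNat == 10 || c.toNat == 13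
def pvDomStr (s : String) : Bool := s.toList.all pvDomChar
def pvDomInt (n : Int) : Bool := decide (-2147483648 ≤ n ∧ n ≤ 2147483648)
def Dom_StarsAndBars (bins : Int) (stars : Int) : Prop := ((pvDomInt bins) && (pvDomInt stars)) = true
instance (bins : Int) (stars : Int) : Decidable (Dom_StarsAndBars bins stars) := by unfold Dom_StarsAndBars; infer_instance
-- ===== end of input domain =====

-- B replaces A's explicit (positions-list, level) stack loop with a recursive generator
-- over the number of bins, counting the first part down; objective: simpler.

-- ===== PORT A =====
-- A is a generator; its port returns the list of all yielded tuples in yield order.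
-- Python's stack `bars` (append/pop at the END) is represented head-as-top: Lean list
-- head = Python list last; pushing the children therefore prepends them in reverse.
-- The level component b[1] is 1,2,…,bins in every reachable state, so it is carried as a Nat.

-- yield tuple(b[0][x] - b[0][x-1] for x in range(1, bins+1)); on reachable yield states
-- all indices 1..bins are in range, so pyGetD's default is never used there.
def pvRow (bins : Int) (lst : List Int) : List Int :=
  (PySem.List.pyRange 1 (bins + 1) 1).map
    (fun x => PySem.List.pyGetD lst x 0 - PySem.List.pyGetD lst (x - 1) 0)

-- termination measure for the while-loop: a weight per stack entry, summed
def pvF (bins stars : Int) (e : List Int × Nat) : Nat :=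
  match e.1[e.2]? with
  | none => 1
  | some v => ((stars + 1 - v).toNat + 2) ^ ((bins - e.2).toNat + 1)

def pvMeas (bins stars : Int) (bars : List (List Int × Nat)) : Nat :=
  (bars.map (pvF bins stars)).sum

theorem pvF_pos (bins stars : Int) (e : List Int × Nat) : 1 ≤ pvF bins stars e := by
  unfold pvF
  split
  · exact le_refl 1
  · exact Nat.one_le_pow _ _ (by omega)


theorem pvChild_le (bins stars : Int) (lst : List Int) (level : Nat) (v x : Int)
    (hv : lst[level]? = some v) (hx : v ≤ x) (hx2 : x ≤ stars) :
    pvF bins stars (lst.take level ++ List.replicate ((bins - (level:Int)).toNat) x ++ [stars], level + 1)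
      ≤ ((stars + 1 - v).toNat + 2) ^ ((bins - (level:Int)).toNat) := by
  have hlen : level < lst.length := (List.getElem?_eq_some_iff.1 hv).1
  have htk : (lst.take level).length = level := by simp [List.length_take]; omega
  set t := (bins - (level:Int)).toNat with ht
  have hidx : (lst.take level ++ List.replicate t x ++ [stars])[level + 1]?
      = (List.replicate t x ++ [stars])[1]? := by
    rw [List.append_assoc, List.getElem?_append_right (by omega)]
    congr 1; omega
  match t, ht with
  | 0, ht =>
    have : (List.replicate 0 x ++ [stars])[1]? = (none : Option Int) := by simp
    unfold pvF; simp only [hidx, this]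
    exact Nat.one_le_pow _ _ (by omega)
  | 1, ht =>
    have h1 : (List.replicate 1 x ++ [stars])[1]? = some stars := by simp
    have hbl : bins - (level:Int) = 1 := by omega
    have he : (bins - ((level:Nat)+1 : Nat)).toNat + 1 = 1 := by
      push_cast; omega
    unfold pvF; simp only [hidx, h1, he]
    have : (stars + 1 - stars).toNat + 2 = 3 := by omega
    rw [this]
    have hn : 1 ≤ (stars + 1 - v).toNat := by omega
    calc 3 ^ 1 = 3 := by norm_num
    _ ≤ ((stars + 1 - v).toNat + 2) ^ 1 := by simpa using by omega
  | (k+2), ht =>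
    have h1 : (List.replicate (k+2) x ++ [stars])[1]? = some x := by
      rw [List.getElem?_append_left (by simp)]
      simp
    have hbl : bins - (level:Int) = (k:Int) + 2 := by omega
    have he : (bins - ((level:Nat)+1 : Nat)).toNat + 1 = k + 2 := by
      push_cast; omega
    unfold pvF; simp only [hidx, h1, he]
    exact Nat.pow_le_pow_left (by omega) _

theorem pvMeas_push (bins stars : Int) (lst : List Int) (level : Nat) (v : Int)
    (hv : lst[level]? = some v) :
    pvMeas bins stars
      (((PySem.List.pyRange v (stars + 1) 1).map
        (fun x => (PySem.List.slice lst none (some (level : Int)) ++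
                   PySem.List.pyRepeat [x] (bins - (level : Int)) ++ [stars], level + 1))).reverse)
      < pvF bins stars (lst, level) := by
  set n := (stars + 1 - v).toNat with hn
  set t := (bins - (level:Int)).toNat with ht
  have hM : 1 ≤ (n + 2) ^ t := Nat.one_le_pow _ _ (by omega)
  have hsum : pvMeas bins stars
      (((PySem.List.pyRange v (stars + 1) 1).map
        (fun x => (PySem.List.slice lst none (some (level : Int)) ++
                   PySem.List.pyRepeat [x] (bins - (level : Int)) ++ [stars], level + 1))).reverse)
      ≤ n * ((n + 2) ^ t) := by
    unfold pvMeas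
    rw [List.map_reverse, List.sum_reverse, List.map_map]
    have hb : ∀ y ∈ (PySem.List.pyRange v (stars + 1) 1).map
        ((pvF bins stars) ∘ (fun x => (PySem.List.slice lst none (some (level : Int)) ++
                   PySem.List.pyRepeat [x] (bins - (level : Int)) ++ [stars], level + 1))),
        y ≤ (n + 2) ^ t := by
      intro y hy
      rcases List.mem_map.1 hy with ⟨x, hxmem, rfl⟩
      rcases (PySem.List.mem_pyRange_one).1 hxmem with ⟨hx1, hx2⟩
      simp only [Function.comp_apply, PySem.List.slice_to_natCast, PySem.List.pyRepeat_singleton]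
      exact pvChild_le bins stars lst level v x hv hx1 (by omega)
    calc ((PySem.List.pyRange v (stars + 1) 1).map _).sum
        ≤ ((PySem.List.pyRange v (stars + 1) 1).map _).length • ((n + 2) ^ t) :=
          List.sum_le_card_nsmul _ _ hb
      _ = n * ((n + 2) ^ t) := by
          simp [PySem.List.length_pyRange_one, hn]
  have hfe : pvF bins stars (lst, level) = (n + 2) ^ (t + 1) := by
    unfold pvF; simp only [hv]; rw [hn, ht]
  rw [hfe, pow_succ]
  have : n * ((n + 2) ^ t) < ((n + 2) ^ t) * (n + 2) := by nlinarith
  omega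


def SBloop (bins stars : Int) (bars : List (List Int × Nat)) : List (List Int) :=
  match bars with
  | [] => []
  | (lst, level) :: rest =>
    if ((level : Int) = bins) then
      -- yield branch
      pvRow bins lst :: SBloop bins stars rest
    else
      match h : PySem.List.pyGet? lst (level : Int) with
      | none => SBloop bins stars rest  -- Python raises IndexError here (reachable only when bins ≤ 0, outside Pre_)
      | some v =>
        -- bar = b[0][:b[1]]; for x in range(b[0][b[1]], stars+1): push bar + [x]*(bins-b[1]) + [stars]
        SBloop bins stars
          ((((PySem.List.pyRange v (stars + 1) 1).map
            (fun x => (PySem.List.slice lst none (some (level : Int)) ++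
                       PySem.List.pyRepeat [x] (bins - (level : Int)) ++ [stars], level + 1))).reverse) ++ rest)
termination_by pvMeas bins stars bars
decreasing_by
  · unfold pvMeas; simp only [List.map_cons, List.sum_cons]
    have := pvF_pos bins stars (lst, level); omega
  · unfold pvMeas; simp only [List.map_cons, List.sum_cons]
    have := pvF_pos bins stars (lst, level); omega
  · have h' : lst[level]? = some v := by
      simpa using h
    have hlt := pvMeas_push bins stars lst level v h'
    unfold pvMeas at *
    simp only [List.map_append, List.sum_append, List.map_cons, List.sum_cons]
    omega

def StarsAndBars (bins : Int) (stars : Int) : List (List Int) :=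
  SBloop bins stars [(PySem.List.pyRepeat [0] bins ++ [stars], 1)]

-- ===== PORT B =====
-- helper(b, s): if b == 1: yield (s,) else for first in range(s, -1, -1): yield (first,)+rest.
-- b is carried as a Nat (B is only called with bins ≥ 1 under Pre_; for bins ≤ 0 Python B
-- yields nothing when stars < 0 — matched by the 0 case — and recurses forever otherwise).
def SBhelper : Nat → Int → List (List Int)
  | 0, _ => []
  | 1, s => [[s]]
  | (b + 2), s =>
    (PySem.List.pyRange s (-1) (-1)).flatMap
      (fun first => (SBhelper (b + 1) (s - first)).map (fun rest => first :: rest))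

def StarsAndBars_alt (bins : Int) (stars : Int) : List (List Int) :=
  SBhelper bins.toNat stars

-- ===== PRECONDITION & SPEC =====
-- Pre_ excludes exactly bins ≤ 0, where A raises IndexError (b[0][b[1]] on the too-short start list).
def Pre_StarsAndBars (bins : Int) (stars : Int) : Prop := 1 ≤ bins
instance (bins : Int) (stars : Int) : Decidable (Pre_StarsAndBars bins stars) := by unfold Pre_StarsAndBars; infer_instance
def pvWitness_StarsAndBars : Int × Int := (3, 2)

def Spec_StarsAndBars (bins : Int) (stars : Int) (out : List (List Int)) : Prop := out = StarsAndBars_alt bins stars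
instance (bins : Int) (stars : Int) (out : List (List Int)) : Decidable (Spec_StarsAndBars bins stars out) := by unfold Spec_StarsAndBars; infer_instance

-- ===== CLAIM (what is proved, stated in full; the proofs are below) =====
def Claim_equal_StarsAndBars : Prop := ∀ (bins : Int) (stars : Int), Dom_StarsAndBars bins stars → Pre_StarsAndBars bins stars → Spec_StarsAndBars bins stars (StarsAndBars bins stars)

-- ===== LEMMAS AND PROOFS =====

theorem pvMeas_append (bins stars : Int) (a b : List (List Int × Nat)) :
    pvMeas bins stars (a ++ b) = pvMeas bins stars a + pvMeas bins stars b := by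
  unfold pvMeas; rw [List.map_append, List.sum_append]



theorem SBloop_nil (bins stars : Int) : SBloop bins stars [] = [] := by
  rw [SBloop]

theorem SBloop_cons_yield (bins stars : Int) (lst : List Int) (level : Nat)
    (rest : List (List Int × Nat)) (h : (level : Int) = bins) :
    SBloop bins stars ((lst, level) :: rest) = pvRow bins lst :: SBloop bins stars rest := by
  rw [SBloop]
  simp only [if_pos h]

theorem SBloop_cons_none (bins stars : Int) (lst : List Int) (level : Nat)
    (rest : List (List Int × Nat)) (h : ¬ ((level : Int) = bins)) (hg : lst[level]? = none) :
    SBloop bins stars ((lst, level) :: rest) = SBloop bins stars rest := by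
  rw [SBloop]
  simp only [if_neg h]
  split
  · rfl
  · rename_i v heq
    rw [PySem.List.pyGet?_natCast, hg] at heq
    exact absurd heq (by simp)

theorem SBloop_cons_some (bins stars : Int) (lst : List Int) (level : Nat) (v : Int)
    (rest : List (List Int × Nat)) (h : ¬ ((level : Int) = bins)) (hg : lst[level]? = some v) :
    SBloop bins stars ((lst, level) :: rest) =
      SBloop bins stars
        ((((PySem.List.pyRange v (stars + 1) 1).map
          (fun x => (lst.take level ++ List.replicate ((bins - (level:Int)).toNat) x ++ [stars], level + 1))).reverse) ++ rest) := by
  rw [SBloop]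
  simp only [if_neg h]
  split
  · rename_i heq
    rw [PySem.List.pyGet?_natCast, hg] at heq
    exact absurd heq (by simp)
  · rename_i w heq
    rw [PySem.List.pyGet?_natCast, hg] at heq
    injection heq with heq
    subst heq
    simp only [PySem.List.slice_to_natCast, PySem.List.pyRepeat_singleton]

theorem SBloop_append_aux (bins stars : Int) :
    ∀ (N : Nat) (s1 s2 : List (List Int × Nat)), pvMeas bins stars s1 ≤ N →
      SBloop bins stars (s1 ++ s2) = SBloop bins stars s1 ++ SBloop bins stars s2 := by
  intro N
  induction N with
  | zero =>
    intro s1 s2 hm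
    match s1 with
    | [] => simp [SBloop_nil]
    | e :: t1 =>
      exfalso
      have h1 := pvF_pos bins stars e
      have : pvMeas bins stars (e :: t1) = pvF bins stars e + pvMeas bins stars t1 := by
        unfold pvMeas; simp
      omega
  | succ N ih =>
    intro s1 s2 hm
    match s1 with
    | [] => simp [SBloop_nil]
    | (lst, level) :: t1 =>
      have hmc : pvMeas bins stars ((lst, level) :: t1) = pvF bins stars (lst, level) + pvMeas bins stars t1 := by
        unfold pvMeas; simp
      have hfp := pvF_pos bins stars (lst, level)
      by_cases hy : (level : Int) = bins
      · rw [List.cons_append, SBloop_cons_yield _ _ _ _ _ hy, SBloop_cons_yield _ _ _ _ _ hy,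
            ih t1 s2 (by omega), List.cons_append]
      · cases hg : lst[level]? with
        | none =>
          rw [List.cons_append, SBloop_cons_none _ _ _ _ _ hy hg, SBloop_cons_none _ _ _ _ _ hy hg,
              ih t1 s2 (by omega)]
        | some v =>
          have hpush := pvMeas_push bins stars lst level v hg
          have hC : pvMeas bins stars
              (((PySem.List.pyRange v (stars + 1) 1).map
                (fun x => (lst.take level ++ List.replicate ((bins - (level:Int)).toNat) x ++ [stars], level + 1))).reverse)
              < pvF bins stars (lst, level) := by
            simpa only [PySem.List.slice_to_natCast, PySem.List.pyRepeat_singleton] using hpush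
          rw [List.cons_append, SBloop_cons_some _ _ _ _ _ _ hy hg, SBloop_cons_some _ _ _ _ _ _ hy hg,
              ← List.append_assoc]
          exact ih _ s2 (by rw [pvMeas_append]; omega)

theorem SBloop_append (bins stars : Int) (s1 s2 : List (List Int × Nat)) :
    SBloop bins stars (s1 ++ s2) = SBloop bins stars s1 ++ SBloop bins stars s2 :=
  SBloop_append_aux bins stars (pvMeas bins stars s1) s1 s2 le_rfl

theorem SBloop_flatMap (bins stars : Int) (l : List (List Int × Nat)) :
    SBloop bins stars l = l.flatMap (fun e => SBloop bins stars [e]) := by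
  induction l with
  | nil => simp [SBloop_nil]
  | cons e tl ih =>
    rw [← List.singleton_append, SBloop_append, ih]
    simp

-- the list of consecutive differences p[k+1]-p[k]; A's yielded tuple is pdiffs of the final bar list
def pdiffs (p : List Int) : List Int :=
  (List.range (p.length - 1)).map (fun k => p.getD (k+1) 0 - p.getD k 0)

theorem pvRow_eq (bins : Int) (lst : List Int) (hb : 0 ≤ bins)
    (h : lst.length = bins.toNat + 1) : pvRow bins lst = pdiffs lst := by
  unfold pvRow pdiffs
  rw [PySem.List.pyRange_one, List.map_map]
  have hn : ((bins + 1 - 1 : Int)).toNat = lst.length - 1 := by omega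
  rw [hn]
  apply List.map_congr_left
  intro k hk
  have e1 : (1 : Int) + (k : Int) = ((k + 1 : Nat) : Int) := by push_cast; ring
  have e2 : ((k + 1 : Nat) : Int) - 1 = ((k : Nat) : Int) := by push_cast; ring
  simp only [Function.comp_apply, e1, e2, PySem.List.pyGetD_natCast]

theorem pdiffs_snoc (p : List Int) (x v : Int) (hp : p ≠ [])
    (hl : p.getD (p.length - 1) 0 = v) :
    pdiffs (p ++ [x]) = pdiffs p ++ [x - v] := by
  have hlen : 1 ≤ p.length := List.length_pos_iff.2 hp
  unfold pdiffs
  have h1 : (p ++ [x]).length - 1 = (p.length - 1) + 1 := by simp; omega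
  rw [h1, List.range_succ, List.map_append]
  congr 1
  · apply List.map_congr_left
    intro k hk
    have hk' : k < p.length - 1 := List.mem_range.1 hk
    rw [List.getD_append _ _ _ _ (by omega), List.getD_append _ _ _ _ (by omega)]
  · simp only [List.map_cons, List.map_nil]
    congr 2
    · have : p.length - 1 + 1 = p.length := by omega
      rw [this, List.getD_append_right _ _ _ _ (by omega)]
      simp
    · rw [List.getD_append _ _ _ _ (by omega), hl]

theorem pyRange_down (v stars : Int) :
    PySem.List.pyRange (stars - v) (-1) (-1)
      = ((PySem.List.pyRange v (stars + 1) 1).reverse).map (fun x => x - v) := by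
  rw [PySem.List.pyRange_neg_one, PySem.List.pyRange_one]
  rw [← List.map_reverse, List.map_map]
  apply List.ext_getElem
  · simp; omega
  · intro i h1 h2
    simp only [List.getElem_map, List.getElem_reverse, List.getElem_range, Function.comp_apply]
    simp only [List.length_reverse, List.length_map, List.length_range] at h1 h2 ⊢
    push_cast
    omega

theorem emit_eq (bins stars : Int) :
    ∀ (t : Nat) (p : List Int) (v : Int), p ≠ [] → bins = (p.length : Int) + t →
      p.getD (p.length - 1) 0 = v →
      SBloop bins stars [(p ++ List.replicate t v ++ [stars], p.length)]
        = (SBhelper (t+1) (stars - v)).map (fun q => pdiffs p ++ q) := by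
  intro t
  induction t with
  | zero =>
    intro p v hp hb hl
    have hlev : ((p.length : Nat) : Int) = bins := by omega
    rw [List.replicate_zero, List.append_nil, SBloop_cons_yield _ _ _ _ _ hlev, SBloop_nil]
    rw [pvRow_eq bins _ (by omega) (by simp; omega), pdiffs_snoc p stars v hp hl]
    rw [SBhelper]
    simp
  | succ t ih =>
    intro p v hp hb hl
    have hlev : ¬ (((p.length : Nat) : Int) = bins) := by omega
    have hg : (p ++ List.replicate (t+1) v ++ [stars])[p.length]? = some v := by
      rw [List.append_assoc, List.getElem?_append_right (by simp)]
      simp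
    rw [SBloop_cons_some _ _ _ _ _ _ hlev hg, List.append_nil]
    have htk : (p ++ List.replicate (t+1) v ++ [stars]).take p.length = p := by
      rw [List.append_assoc, List.take_left]
    have htn : ((bins - (p.length : Int)).toNat) = t + 1 := by omega
    rw [htk, htn]
    rw [SBloop_flatMap, ← List.map_reverse, List.flatMap_map]
    rw [SBhelper, List.map_flatMap, pyRange_down v stars, List.flatMap_map]
    congr 1
    funext x
    have hshape : p ++ List.replicate (t+1) x ++ [stars] = (p ++ [x]) ++ List.replicate t x ++ [stars] := by
      simp [List.replicate_succ, List.append_assoc]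
    have hlen1 : p.length + 1 = (p ++ [x]).length := by simp
    have hl' : (p ++ [x]).getD ((p ++ [x]).length - 1) 0 = x := by
      simp
    rw [hshape, hlen1, ih (p ++ [x]) x (by simp) (by simp; omega) hl']
    simp only [pdiffs_snoc p x v hp hl]
    simp only [show stars - v - (x - v) = stars - x from by ring]
    rw [List.map_map]
    apply List.map_congr_left
    intro q _
    simp [List.append_assoc]

theorem StarsAndBars_main : ∀ (bins stars : Int), 1 ≤ bins →
    StarsAndBars bins stars = StarsAndBars_alt bins stars := by
  intro bins stars hb
  unfold StarsAndBars StarsAndBars_alt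
  rw [PySem.List.pyRepeat_singleton]
  set t := bins.toNat - 1 with ht
  have h1 : bins.toNat = t + 1 := by omega
  have hshape : List.replicate bins.toNat (0:Int) ++ [stars]
      = [(0:Int)] ++ List.replicate t (0:Int) ++ [stars] := by
    rw [h1, List.replicate_succ]
    simp
  rw [hshape]
  have hmain := emit_eq bins stars t [(0:Int)] 0 (by simp) (by simp; omega) (by simp)
  rw [show ([(0:Int)].length) = 1 from rfl] at hmain
  rw [hmain, h1]
  simp [pdiffs]

-- ===== VERDICT (by name: the statement is the Claim_ definition above) =====
theorem StarsAndBars_spec : Claim_equal_StarsAndBars := by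
  intro bins stars _ hpre
  exact StarsAndBars_main bins stars hpre
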